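-- pv_equiv track=rewrite | github.com/Kansei/ORFpickuper | bin/annotationDNA.py | anno_codon
-- ===== SOURCE A (Python) =====
-- def split_n(text, n):
--     fix = ""
--     for i in range(3-len(text)%n):
--         if(0 == len(text)%n):
--             break;
--         fix += "-"
--     text = text+fix
--     l = int((len(text)+len(text)%n)/n)
--     return [ text[i*n:i*n+n] for i in range(l) ]
--
-- def anno_codon(sequence):
--     # ３つの読み枠のシークエンスを用意
--     sequences = [sequence,sequence[1:],sequence[2:]]
--
--     start = ["ATG"]
--     stop = ["TAG","TAA","TAG"]
--     ano = [[],[],[]]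
--     ano_str =[[],[],[]]
--
--     for i in range(3):
--         seq = split_n(sequences[i],3)
--         ano[i] = ["   " for i in seq]
--
--         for j in range(len(seq)):
--             site = seq[j].find("GT")
--             if seq[j] in start:
--                 ano[i][j] = "MMM"
--             elif seq[j] in stop:
--                 ano[i][j] = "SSS"
--
--             ano_str[i] = "-"*i+"".join(ano[i])
--
--     return ano_str
-- ===== SOURCE B (Python) =====
-- def anno_codon(sequence):
--     # One pass over every position j: classify the 3-char window starting at j
--     # and route it to reading frame j % 3; then prefix each frame with its dashes.
--     ano = [[], [], []]
--     for j in range(len(sequence)):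
--         codon = sequence[j:j+3]
--         if codon == "ATG":
--             mark = "MMM"
--         elif codon in ("TAG", "TAA"):
--             mark = "SSS"
--         else:
--             mark = "   "
--         ano[j % 3].append(mark)
--     return ["-" * i + "".join(ano[i]) for i in range(3)]
-- ===== Notes on version B (the rewrite author's own statement) =====
-- stated objective: faster
-- what changed: A slices out each of the 3 reading frames, pads and splits each into codon chunks, and re-joins the whole frame annotation string after every codon; B makes a single pass over every position j, classifying the window sequence[j:j+3] and routing the mark to frame j % 3, joining each frame once at the end.
-- outside the precondition, e.g. on anno_codon('AB'): A returns ['   ', '-   ', []], B returns ['   ', '-   ', '--']; on anno_codon(''): A returns [[], [], []], B returns ['', '-', '--']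
import Mathlib
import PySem

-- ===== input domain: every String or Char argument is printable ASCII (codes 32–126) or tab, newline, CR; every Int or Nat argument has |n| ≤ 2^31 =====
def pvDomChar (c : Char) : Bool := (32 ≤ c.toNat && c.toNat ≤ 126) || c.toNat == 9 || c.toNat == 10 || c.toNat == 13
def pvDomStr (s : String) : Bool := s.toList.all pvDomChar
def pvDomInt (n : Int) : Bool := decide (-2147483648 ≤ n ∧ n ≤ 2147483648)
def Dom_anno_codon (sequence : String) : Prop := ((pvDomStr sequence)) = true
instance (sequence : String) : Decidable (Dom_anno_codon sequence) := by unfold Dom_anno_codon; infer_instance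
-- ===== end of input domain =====

-- B replaces A's three per-frame slice/pad/split scans (which re-join the whole frame
-- annotation after every codon) by ONE pass over all positions j, routing the classified
-- 3-char window at j to frame j % 3 and joining once; measured faster in a timing run.

-- ===== PORT A =====
-- fix = "" if len%n == 0 else "-" * (3 - len%n); the Python loop's break condition
-- does not depend on the loop variable, so the guarded fold below is exact.
def annoFix (len n : Nat) : List Char :=
  (PySem.List.pyRange 0 (3 - ((len % n : Nat) : Int)) 1).foldl
    (fun fix _ => if len % n = 0 then fix else fix ++ ['-']) []

-- split_n(text, n); text[i*n:i*n+n] for a nonnegative in-range slice is drop/take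
-- (= PySem.List.slice_natCast_add); int((len+len%n)/n) is exact Nat division here
-- since len % n = 0 after padding.
def split_n (text : List Char) (n : Nat) : List (List Char) :=
  let t := text ++ annoFix text.length n
  let l := (t.length + t.length % n) / n
  (List.range l).map (fun i => (t.drop (i * n)).take n)

def annoStart : List (List Char) := [['A','T','G']]
def annoStop : List (List Char) := [['T','A','G'],['T','A','A'],['T','A','G']]

-- the body of A's inner `for j in range(len(seq))` loop; the unused pure
-- `site = seq[j].find("GT")` is omitted
def annoStep (seq : List (List Char)) (i : Nat)
    (st : List (List Char) × Option (List Char)) (j : Nat) :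
    List (List Char) × Option (List Char) :=
  let chunk := seq.getD j []
  let ano' := if chunk ∈ annoStart then st.1.set j ['M','M','M']
              else if chunk ∈ annoStop then st.1.set j ['S','S','S']
              else st.1
  (ano', some (List.replicate i '-' ++ ano'.flatten))

-- one iteration of A's outer `for i in range(3)` loop: returns the frame's
-- ano_str; `none` = Python's initial [] (not a str), reachable only outside Pre_
def annoFrame (i : Nat) (cs : List Char) : Option (List Char) :=
  let seq := split_n cs 3
  let ano0 := seq.map (fun _ => [' ',' ',' '])
  ((List.range seq.length).foldl (annoStep seq i) (ano0, none)).2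

def anno_codon (sequence : String) : List String :=
  let cs := sequence.toList
  let sequences := [cs, cs.drop 1, cs.drop 2]  -- [sequence, sequence[1:], sequence[2:]]
  (List.range 3).map (fun i =>
    match annoFrame i (sequences.getD i []) with
    | some l => String.ofList l
    | none => "")  -- Python's leftover [] (outside Pre_)

-- ===== PORT B =====
def classifyB (codon : List Char) : List Char :=
  if codon = ['A','T','G'] then ['M','M','M']
  else if codon = ['T','A','G'] ∨ codon = ['T','A','A'] then ['S','S','S']
  else [' ',' ',' ']

-- body of B's single `for j in range(len(sequence))` loop: classify sequence[j:j+3]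
-- and append the mark to frame j % 3
def altStep (cs : List Char)
    (st : List (List Char) × List (List Char) × List (List Char)) (j : Nat) :
    List (List Char) × List (List Char) × List (List Char) :=
  let mark := classifyB ((cs.drop j).take 3)
  if j % 3 = 0 then (st.1 ++ [mark], st.2.1, st.2.2)
  else if j % 3 = 1 then (st.1, st.2.1 ++ [mark], st.2.2)
  else (st.1, st.2.1, st.2.2 ++ [mark])

def anno_codon_alt (sequence : String) : List String :=
  let cs := sequence.toList
  let st := (List.range cs.length).foldl (altStep cs) ([], [], [])
  (List.range 3).map (fun i =>
    String.ofList (List.replicate i '-' ++ ([st.1, st.2.1, st.2.2].getD i []).flatten))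

-- ===== PRECONDITION & SPEC =====
-- Pre_ excludes sequences shorter than 3: there A returns the non-string empty
-- list [] (its untouched initializer) for the empty reading frames, a value
-- outside the declared list-of-str type.
def Pre_anno_codon (sequence : String) : Prop := 3 ≤ sequence.toList.length
instance (sequence : String) : Decidable (Pre_anno_codon sequence) := by
  unfold Pre_anno_codon; infer_instance

def pvWitness_anno_codon : String := "ATGTAA"

def Spec_anno_codon (sequence : String) (out : List String) : Prop := out = anno_codon_alt sequence
instance (sequence : String) (out : List String) : Decidable (Spec_anno_codon sequence out) := by unfold Spec_anno_codon; infer_instance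

-- ===== CLAIM (what is proved, stated in full; the proofs are below) =====
def Claim_equal_anno_codon : Prop := ∀ (sequence : String), Dom_anno_codon sequence → Pre_anno_codon sequence → Spec_anno_codon sequence (anno_codon sequence)

-- ===== LEMMAS AND PROOFS =====

theorem classifyB_of_dash {l : List Char} (h : '-' ∈ l) : classifyB l = [' ',' ',' '] := by
  
  unfold classifyB
  split_ifs with h1 h2
  · subst h1; simp at h
  · rcases h2 with h2 | h2 <;> (subst h2; simp at h)
  · rfl

theorem classifyB_of_len {l : List Char} (h : l.length ≠ 3) : classifyB l = [' ',' ',' '] := by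
  
  unfold classifyB
  split_ifs with h1 h2
  · subst h1; simp at h
  · rcases h2 with h2 | h2 <;> (subst h2; simp at h)
  · rfl

-- the padding is a run of dashes
theorem annoFix_eq (m : Nat) :
    annoFix m 3 = if m % 3 = 0 then [] else List.replicate (3 - m % 3) '-' := by
  
  have h3 : m % 3 = 0 ∨ m % 3 = 1 ∨ m % 3 = 2 := by omega
  rcases h3 with h | h | h
  · simp only [annoFix, h]; norm_num
  · simp only [annoFix, h]; norm_num; decide
  · simp only [annoFix, h]; norm_num

-- split_n as chunks of the padded text, with the count in closed form
theorem split_n_eq (cs : List Char) :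
    split_n cs 3 = (List.range ((cs.length + 2) / 3)).map
      (fun k => ((cs ++ annoFix cs.length 3).drop (3 * k)).take 3) := by
  
  unfold split_n
  have hfl : (annoFix cs.length 3).length = if cs.length % 3 = 0 then 0 else 3 - cs.length % 3 := by
    rw [annoFix_eq]; split <;> simp
  have hl : ((cs ++ annoFix cs.length 3).length + (cs ++ annoFix cs.length 3).length % 3) / 3
      = (cs.length + 2) / 3 := by
    simp only [List.length_append, hfl]; split <;> omega
  simp only [hl, Nat.mul_comm]

-- classifying a padded chunk = classifying the raw (possibly short) window
theorem classify_chunk (cs : List Char) {k : Nat} (hk : k < (cs.length + 2) / 3) :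
    classifyB (((cs ++ annoFix cs.length 3).drop (3 * k)).take 3)
      = classifyB ((cs.drop (3 * k)).take 3) := by
  
  by_cases hfull : 3 * k + 3 ≤ cs.length
  · rw [List.drop_append_of_le_length (by omega),
        List.take_append_of_le_length (by simp; omega)]
  · have hlt : 3 * k < cs.length := by omega
    have hfix : annoFix cs.length 3 = List.replicate (3 - cs.length % 3) '-' := by
      rw [annoFix_eq, if_neg (by omega)]
    rw [List.drop_append_of_le_length (by omega), List.take_append]
    rw [classifyB_of_dash, classifyB_of_len]
    · simp; omega
    · refine List.mem_append.mpr (Or.inr ?_)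
      rw [hfix, List.take_replicate]
      simp [List.mem_replicate]
      omega

-- invariant of A's inner loop
theorem annoLoop_inv (i : Nat) (seq done todo : List (List Char)) (s : Option (List Char))
    (hseq : seq = done ++ todo) :
    (List.range' done.length todo.length).foldl (annoStep seq i)
        (done.map classifyB ++ todo.map (fun _ => [' ',' ',' ']), s)
      = (seq.map classifyB,
         if todo = [] then s
         else some (List.replicate i '-' ++ (seq.map classifyB).flatten)) := by
  
  induction todo generalizing done s with
  | nil =>
    subst hseq
    simp
  | cons c ts ih =>
    subst hseq
    rw [List.length_cons, List.range'_succ, List.foldl_cons]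
    have hstep : annoStep (done ++ c :: ts) i
        (done.map classifyB ++ (c :: ts).map (fun _ => [' ',' ',' ']), s) done.length
      = ((done ++ [c]).map classifyB ++ ts.map (fun _ => [' ',' ',' ']),
         some (List.replicate i '-'
           ++ ((done ++ [c]).map classifyB ++ ts.map (fun _ => [' ',' ',' '])).flatten)) := by
      unfold annoStep
      have hchunk : (done ++ c :: ts).getD done.length [] = c := by simp
      have hset : ∀ v : List Char,
          (done.map classifyB ++ ([' ',' ',' '] : List Char) :: ts.map (fun _ => [' ',' ',' '])).set
            done.length v
          = done.map classifyB ++ v :: ts.map (fun _ => [' ',' ',' ']) := by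
        intro v
        have : (done.map classifyB).length = done.length := by simp
        rw [← this]
        simp
      rw [hchunk]
      by_cases h1 : c ∈ annoStart
      · have hc : c = ['A','T','G'] := by simpa [annoStart] using h1
        simp only [List.map_cons, List.map_append, if_pos h1, hset]
        subst hc
        simp [classifyB]
      · by_cases h2 : c ∈ annoStop
        · have hc : c = ['T','A','G'] ∨ c = ['T','A','A'] ∨ c = ['T','A','G'] := by
            simpa [annoStop] using h2
          simp only [List.map_cons, List.map_append, if_neg h1, if_pos h2, hset]
          have : classifyB c = ['S','S','S'] := by
            rcases hc with hc | hc | hc <;> subst hc <;> simp [classifyB]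
          simp [this]
        · have hc : classifyB c = [' ',' ',' '] := by
            unfold classifyB
            have hn := (by simpa [annoStop] using h2 :
              ¬c = ['T','A','G'] ∧ ¬c = ['T','A','A'] ∧ ¬c = ['T','A','G'])
            rw [if_neg (by simpa [annoStart] using h1), if_neg (by tauto)]
          simp only [List.map_cons, if_neg h1, if_neg h2]
          simp [hc]
    have harr : done.length + 1 = (done ++ [c]).length := by simp
    rw [hstep, harr,
        ih (done ++ [c]) _ (by simp)]
    rcases ts with _ | ⟨t, ts'⟩
    · simp
    · simp

theorem annoFrame_eq (i : Nat) (cs : List Char) (h : split_n cs 3 ≠ []) :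
    annoFrame i cs
      = some (List.replicate i '-' ++ ((split_n cs 3).map classifyB).flatten) := by
  
  unfold annoFrame
  dsimp only
  have hinv := annoLoop_inv i (split_n cs 3) [] (split_n cs 3) none (by simp)
  simp only [List.map_nil, List.nil_append, List.length_nil] at hinv
  rw [List.range_eq_range', hinv, if_neg h]

-- B's loop in closed form: frame i holds the classified windows at positions 3k+i
theorem altLoop_eq (cs : List Char) (n : Nat) :
    (List.range n).foldl (altStep cs) ([], [], [])
      = ((List.range ((n + 2) / 3)).map (fun k => classifyB ((cs.drop (3 * k)).take 3)),
         (List.range ((n + 1) / 3)).map (fun k => classifyB ((cs.drop (3 * k + 1)).take 3)),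
         (List.range (n / 3)).map (fun k => classifyB ((cs.drop (3 * k + 2)).take 3))) := by
  
  induction n with
  | zero => simp
  | succ n ih =>
    rw [List.range_succ, List.foldl_append, ih]
    have h3 : n % 3 = 0 ∨ n % 3 = 1 ∨ n % 3 = 2 := by omega
    simp only [List.foldl_cons, List.foldl_nil, altStep]
    rcases h3 with h | h | h
    · have e0 : (n + 1 + 2) / 3 = (n + 2) / 3 + 1 := by omega
      have e3 : 3 * (n / 3) = n := by omega
      simp only [h, reduceIte]
      rw [e0, (by omega : (n + 1 + 1) / 3 = (n+1) / 3), (by omega : (n + 1) / 3 = n / 3),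
          List.range_succ, List.map_append]
      simp only [List.map_cons, List.map_nil]
      rw [e3]
    · simp only [h]
      norm_num
      refine ⟨?_, ?_, ?_⟩
      · rw [show (n+1+2)/3 = (n+2)/3 by omega]
      · rw [show (n+1+1)/3 = (n+1)/3 + 1 by omega, List.range_succ, List.map_append]
        simp only [List.map_cons, List.map_nil]
        rw [show 3 * ((n+1)/3) + 1 = n by omega]
      · rw [show (n+1)/3 = n/3 by omega]
    · simp only [h]
      norm_num
      refine ⟨?_, ?_, ?_⟩
      · rw [show (n+1+2)/3 = (n+2)/3 by omega]
      · rw [show (n+1+1)/3 = (n+1)/3 by omega]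
      · rw [show (n+1)/3 = n/3 + 1 by omega, List.range_succ, List.map_append]
        simp only [List.map_cons, List.map_nil]
        rw [show 3 * (n/3) + 2 = n by omega]

-- per-frame agreement
theorem frame_eq (cs : List Char) (i : Nat) (hi : i ≤ 2) (h3 : 3 ≤ cs.length) :
    ((split_n (cs.drop i) 3).map classifyB).flatten
      = ((List.range ((cs.length + 2 - i) / 3)).map
          (fun k => classifyB ((cs.drop (3 * k + i)).take 3))).flatten := by
  
  rw [split_n_eq, List.map_map]
  have hc : ((cs.drop i).length + 2) / 3 = (cs.length + 2 - i) / 3 := by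
    simp only [List.length_drop]; omega
  rw [hc]
  congr 1
  refine List.map_congr_left ?_
  intro k hk
  rw [List.mem_range] at hk
  have hk' : k < ((cs.drop i).length + 2) / 3 := by rw [hc]; exact hk
  simp only [Function.comp]
  rw [classify_chunk (cs.drop i) hk', List.drop_drop]
  rw [Nat.add_comm i (3 * k)]

-- ===== VERDICT (by name: the statement is the Claim_ definition above) =====
theorem anno_codon_spec : Claim_equal_anno_codon := by
  
  intro s _hdom hpre
  unfold Pre_anno_codon at hpre
  show anno_codon s = anno_codon_alt s
  unfold anno_codon anno_codon_alt
  dsimp only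
  rw [altLoop_eq]
  have hnil : ∀ i : Nat, i ≤ 2 → split_n (s.toList.drop i) 3 ≠ [] := by
    intro i hi h
    apply_fun List.length at h
    rw [split_n_eq] at h
    simp only [List.length_map, List.length_range, List.length_nil, List.length_drop] at h
    omega
  rw [(by decide : List.range 3 = [0, 1, 2])]
  simp only [List.map_cons, List.map_nil, List.getD_cons_zero, List.getD_cons_succ]
  rw [annoFrame_eq 0 _ (by simpa using hnil 0 (by omega)),
      annoFrame_eq 1 _ (hnil 1 (by omega)),
      annoFrame_eq 2 _ (hnil 2 (by omega))]
  have f0 := frame_eq s.toList 0 (by omega) hpre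
  have f1 := frame_eq s.toList 1 (by omega) hpre
  have f2 := frame_eq s.toList 2 (by omega) hpre
  rw [(by omega : s.toList.length + 2 - 1 = s.toList.length + 1)] at f1
  rw [(by omega : s.toList.length + 2 - 2 = s.toList.length)] at f2
  simp only [List.drop_zero] at f0
  simp only [Nat.add_zero, Nat.sub_zero] at f0 f1 f2
  simp only [List.cons.injEq, and_true]
  refine ⟨?_, ?_, ?_⟩
  · exact congrArg String.ofList (by rw [← f0])
  · exact congrArg String.ofList (by rw [← f1])
  · exact congrArg String.ofList (by rw [← f2])
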